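-- pv_equiv track=rewrite | github.com/acbueff/dNL-NL | dNL-NL/Library/PredicateLibV5.py | subtraction_minmax_helper
-- ===== SOURCE A (Python) =====
-- def subtraction_minmax_helper(list_one,list_two):
--     most_max = 0
--     most_min = 0
--     for x1 in list_one:
--         for x2 in list_two:
--             temp = x1-x2
--             if temp > most_max:
--                 most_max = temp
--             elif temp < most_min:
--                 most_min = temp
--     return most_max, most_min
-- ===== SOURCE B (Python) =====
-- def subtraction_minmax_helper(list_one, list_two):
--     if not list_one or not list_two:
--         return 0, 0
--     return (max(0, max(list_one) - min(list_two)),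
--             min(0, min(list_one) - max(list_two)))
-- ===== Notes on version B (the rewrite author's own statement) =====
-- stated objective: faster
-- what changed: Replaces the nested loop over all pairs by computing each list's max and min once and returning (max(0, max1-min2), min(0, min1-max2)).
import Mathlib
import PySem

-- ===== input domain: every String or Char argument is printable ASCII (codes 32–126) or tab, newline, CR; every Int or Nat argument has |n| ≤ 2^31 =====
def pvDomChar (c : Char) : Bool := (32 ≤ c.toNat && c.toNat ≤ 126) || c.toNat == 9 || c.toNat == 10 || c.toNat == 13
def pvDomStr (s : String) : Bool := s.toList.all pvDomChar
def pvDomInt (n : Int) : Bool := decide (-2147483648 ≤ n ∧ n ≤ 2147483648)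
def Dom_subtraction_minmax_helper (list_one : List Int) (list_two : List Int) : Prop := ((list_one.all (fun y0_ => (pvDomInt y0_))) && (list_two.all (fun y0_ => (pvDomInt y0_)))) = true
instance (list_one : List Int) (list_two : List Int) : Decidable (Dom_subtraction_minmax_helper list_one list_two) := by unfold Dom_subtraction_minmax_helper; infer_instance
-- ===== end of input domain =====

-- B replaces A's O(n*m) nested pairwise scan by one max/min pass per list (objective: faster; measured).
-- ===== PORT A =====
-- literal port of A: nested for-loops over (most_max, most_min) with the if/elif update
def subtraction_minmax_helper (list_one : List Int) (list_two : List Int) : Int × Int :=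
  list_one.foldl (fun s x1 =>
    list_two.foldl (fun s2 x2 =>
      let temp := x1 - x2
      if temp > s2.1 then (temp, s2.2)
      else if temp < s2.2 then (s2.1, temp)
      else s2) s) (0, 0)

-- ===== PORT B =====
-- port of B: empty-list guard, then one max/min per list (faster: O(n+m) vs A's O(n*m))
def subtraction_minmax_helper_alt (list_one : List Int) (list_two : List Int) : Int × Int :=
  match list_one, list_two with
  | [], _ => (0, 0)
  | _, [] => (0, 0)
  | a :: as_, b :: bs =>
    let max1 := as_.foldl max a
    let min1 := as_.foldl min a
    let max2 := bs.foldl max b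
    let min2 := bs.foldl min b
    (max 0 (max1 - min2), min 0 (min1 - max2))

-- ===== PRECONDITION & SPEC =====
def Spec_subtraction_minmax_helper (list_one : List Int) (list_two : List Int) (out : Int × Int) : Prop := out = subtraction_minmax_helper_alt list_one list_two
instance (list_one : List Int) (list_two : List Int) (out : Int × Int) : Decidable (Spec_subtraction_minmax_helper list_one list_two out) := by unfold Spec_subtraction_minmax_helper; infer_instance

-- ===== CLAIM (what is proved, stated in full; the proofs are below) =====
def Claim_equal_subtraction_minmax_helper : Prop := ∀ (list_one : List Int) (list_two : List Int), Dom_subtraction_minmax_helper list_one list_two → Spec_subtraction_minmax_helper list_one list_two (subtraction_minmax_helper list_one list_two)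

-- ===== LEMMAS AND PROOFS =====

-- inner-loop step of A, named for reuse
def pvStep (x1 : Int) (s2 : Int × Int) (x2 : Int) : Int × Int :=
  let temp := x1 - x2
  if temp > s2.1 then (temp, s2.2)
  else if temp < s2.2 then (s2.1, temp)
  else s2

theorem pvA_eq (l1 l2 : List Int) :
    subtraction_minmax_helper l1 l2
      = l1.foldl (fun s x1 => l2.foldl (pvStep x1) s) (0, 0) := rfl

theorem foldl_max_ge (l : List Int) (f : Int → Int) (c : Int) :
    c ≤ l.foldl (fun m x => max m (f x)) c := by
  induction l generalizing c with
  | nil => simp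
  | cons y ys ih => exact le_trans (le_max_left c (f y)) (ih (max c (f y)))

theorem foldl_min_le (l : List Int) (f : Int → Int) (c : Int) :
    l.foldl (fun m x => min m (f x)) c ≤ c := by
  induction l generalizing c with
  | nil => simp
  | cons y ys ih => exact le_trans (ih (min c (f y))) (min_le_left c (f y))

-- under the invariant 0 ≤ mx ∧ mn ≤ 0, A's inner loop splits into a max-fold and a min-fold
theorem inner_eq (x1 : Int) (l2 : List Int) (mx mn : Int) (h1 : 0 ≤ mx) (h2 : mn ≤ 0) :
    l2.foldl (pvStep x1) (mx, mn)
      = (l2.foldl (fun m x2 => max m (x1 - x2)) mx,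
         l2.foldl (fun m x2 => min m (x1 - x2)) mn) := by
  induction l2 generalizing mx mn with
  | nil => rfl
  | cons y ys ih =>
    have hstep : pvStep x1 (mx, mn) y = (max mx (x1 - y), min mn (x1 - y)) := by
      simp only [pvStep]
      split_ifs with hA hB <;> simp_all <;> omega
    simp only [List.foldl_cons, hstep]
    exact ih (max mx (x1 - y)) (min mn (x1 - y)) (le_trans h1 (le_max_left _ _))
      (le_trans (min_le_left _ _) h2)

theorem outer_eq (l1 l2 : List Int) (mx mn : Int) (h1 : 0 ≤ mx) (h2 : mn ≤ 0) :
    l1.foldl (fun s x1 => l2.foldl (pvStep x1) s) (mx, mn)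
      = (l1.foldl (fun m x1 => l2.foldl (fun m2 x2 => max m2 (x1 - x2)) m) mx,
         l1.foldl (fun m x1 => l2.foldl (fun m2 x2 => min m2 (x1 - x2)) m) mn) := by
  induction l1 generalizing mx mn with
  | nil => rfl
  | cons y ys ih =>
    simp only [List.foldl_cons, inner_eq y l2 mx mn h1 h2]
    exact ih _ _ (le_trans h1 (foldl_max_ge l2 _ mx)) (le_trans (foldl_min_le l2 _ mn) h2)

theorem foldl_min_assoc (ys : List Int) (a b : Int) :
    ys.foldl min (min a b) = min a (ys.foldl min b) := by
  induction ys generalizing b with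
  | nil => rfl
  | cons z zs ih => simp only [List.foldl_cons, min_assoc, ih]

theorem foldl_max_assoc (ys : List Int) (a b : Int) :
    ys.foldl max (max a b) = max a (ys.foldl max b) := by
  induction ys generalizing b with
  | nil => rfl
  | cons z zs ih => simp only [List.foldl_cons, max_assoc, ih]

theorem foldl_max_sub (x1 b : Int) (bs : List Int) (c : Int) :
    (b :: bs).foldl (fun m x => max m (x1 - x)) c = max c (x1 - bs.foldl min b) := by
  induction bs generalizing b c with
  | nil => rfl
  | cons y ys ih =>
    simp only [List.foldl_cons] at *
    rw [ih y (max c (x1 - b)), foldl_min_assoc]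
    omega

theorem foldl_min_sub (x1 b : Int) (bs : List Int) (c : Int) :
    (b :: bs).foldl (fun m x => min m (x1 - x)) c = min c (x1 - bs.foldl max b) := by
  induction bs generalizing b c with
  | nil => rfl
  | cons y ys ih =>
    simp only [List.foldl_cons] at *
    rw [ih y (min c (x1 - b)), foldl_max_assoc]
    omega

theorem foldl_max_sub_const (k a : Int) (as_ : List Int) (c : Int) :
    (a :: as_).foldl (fun m x => max m (x - k)) c = max c (as_.foldl max a - k) := by
  induction as_ generalizing a c with
  | nil => rfl
  | cons y ys ih =>
    simp only [List.foldl_cons] at *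
    rw [ih y (max c (a - k)), foldl_max_assoc]
    omega

theorem foldl_min_sub_const (k a : Int) (as_ : List Int) (c : Int) :
    (a :: as_).foldl (fun m x => min m (x - k)) c = min c (as_.foldl min a - k) := by
  induction as_ generalizing a c with
  | nil => rfl
  | cons y ys ih =>
    simp only [List.foldl_cons] at *
    rw [ih y (min c (a - k)), foldl_min_assoc]
    omega

-- ===== VERDICT (by name: the statement is the Claim_ definition above) =====
theorem subtraction_minmax_helper_spec : Claim_equal_subtraction_minmax_helper := by
  intro l1 l2 _
  unfold Spec_subtraction_minmax_helper
  match l1, l2 with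
  | [], l2 => rfl
  | a :: as_, [] =>
    rw [pvA_eq]
    simp [subtraction_minmax_helper_alt]
  | a :: as_, b :: bs =>
    rw [pvA_eq, outer_eq _ _ 0 0 le_rfl le_rfl]
    simp only [subtraction_minmax_helper_alt]
    congr 1
    · calc (a :: as_).foldl (fun m x1 => (b :: bs).foldl (fun m2 x2 => max m2 (x1 - x2)) m) 0
          = (a :: as_).foldl (fun m x1 => max m (x1 - bs.foldl min b)) 0 := by
            congr 1; funext m x1; exact foldl_max_sub x1 b bs m
        _ = max 0 (as_.foldl max a - bs.foldl min b) := foldl_max_sub_const _ a as_ 0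
    · calc (a :: as_).foldl (fun m x1 => (b :: bs).foldl (fun m2 x2 => min m2 (x1 - x2)) m) 0
          = (a :: as_).foldl (fun m x1 => min m (x1 - bs.foldl max b)) 0 := by
            congr 1; funext m x1; exact foldl_min_sub x1 b bs m
        _ = min 0 (as_.foldl min a - bs.foldl max b) := foldl_min_sub_const _ a as_ 0
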